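-- pv_equiv track=rewrite | github.com/agolikova/Rosalind-Bioinformatics-Solutions | Code/MMCH_Maximum Matchings and RNA Secondary Structures.py | max_matchings
-- ===== SOURCE A (Python) =====
-- from math import factorial
--
-- def nPr(n, r):
--     """Returns total no. of possible combinations of 2 nucleotides using given number of occurrences"""
--
--     #n = nt with more occurrences
--     #r = nt with fewer occurrences
--
--     return factorial(n)//factorial(n-r)
--
-- def max_matchings(sequence):
--     """Returns total possible number of maximum matchings of basepair edges in bonding graph of given sequence"""
--
--     AU = []
--     for nt in "AU":
--         AU.append(sequence.count(nt))
--
--     GC = []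
--     for nt in "GC":
--         GC.append(sequence.count(nt))
--
--     #1st A can pair with any U - once that pairing has been made, that pair of bases can be removed from pool and 2nd A can pair with any remaining U
--     #Iterative process can continue until last remaining U/A has been paired & there is excess of As or Us left over
--     #Factorial-style combination problem
--
--     #Multiply no. of AU combos by no. of GC combos to get final solution
--     matchings = nPr(max(AU), min(AU)) * nPr(max(GC), min(GC))
--
--     return int(matchings)
-- ===== SOURCE B (Python) =====
-- def max_matchings(sequence):
--     """Returns total possible number of maximum matchings of basepair edges in bonding graph of given sequence"""
--     tally = {}
--     for ch in sequence:
--         tally[ch] = tally.get(ch, 0) + 1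
--
--     def ways(x, y):
--         # Recursive pairing argument: while both kinds remain, a fixed nucleotide of the
--         # scarcer kind can bond with any of max(x, y) partners; remove that pair and recurse.
--         if x == 0 or y == 0:
--             return 1
--         return max(x, y) * ways(x - 1, y - 1)
--
--     return ways(tally.get('A', 0), tally.get('U', 0)) * ways(tally.get('G', 0), tally.get('C', 0))
-- ===== Notes on version B (the rewrite author's own statement) =====
-- stated objective: alternative
-- what changed: B builds one character-tally dict in a single pass (instead of four sequence.count scans) and counts matchings by a recursive pairing argument ways(x,y)=max(x,y)*ways(x-1,y-1) that removes one bonded pair per step, instead of the closed-form factorial quotient n!//(n-r)!.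
import Mathlib
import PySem

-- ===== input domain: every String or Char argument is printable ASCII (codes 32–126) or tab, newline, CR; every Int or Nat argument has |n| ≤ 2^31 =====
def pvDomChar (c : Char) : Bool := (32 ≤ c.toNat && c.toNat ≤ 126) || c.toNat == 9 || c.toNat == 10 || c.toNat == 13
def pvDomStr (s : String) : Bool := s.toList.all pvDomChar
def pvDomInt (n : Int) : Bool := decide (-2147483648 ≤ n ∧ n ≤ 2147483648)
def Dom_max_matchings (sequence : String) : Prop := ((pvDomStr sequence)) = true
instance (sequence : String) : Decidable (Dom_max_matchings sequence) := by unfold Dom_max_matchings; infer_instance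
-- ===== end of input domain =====

-- B tallies characters into one dict in a single pass and counts matchings by the
-- recursive pairing argument ways(x,y) = max(x,y) * ways(x-1,y-1), instead of A's
-- four .count scans and closed-form factorial quotient (objective: alternative).


-- ===== PORT A =====
-- math.factorial n (argument here is always a nonnegative count)
def pvFactorial (n : Int) : Int := (Nat.factorial n.toNat : Int)

-- nPr(n, r) = factorial(n) // factorial(n-r)
def nPr (n r : Int) : Int := PySem.Int.floordiv (pvFactorial n) (pvFactorial (n - r))

def max_matchings (sequence : String) : Int :=
  -- AU = []; for nt in "AU": AU.append(sequence.count(nt))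
  let AU : List Int :=
    "AU".toList.foldl (fun acc nt => acc ++ [(PySem.Str.count sequence (String.ofList [nt]) : Int)]) []
  -- GC = []; for nt in "GC": GC.append(sequence.count(nt))
  let GC : List Int :=
    "GC".toList.foldl (fun acc nt => acc ++ [(PySem.Str.count sequence (String.ofList [nt]) : Int)]) []
  -- matchings = nPr(max(AU), min(AU)) * nPr(max(GC), min(GC)); return int(matchings)
  let matchings : Int :=
    nPr ((PySem.List.max? AU id).getD 0) ((PySem.List.min? AU id).getD 0) *
    nPr ((PySem.List.max? GC id).getD 0) ((PySem.List.min? GC id).getD 0)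
  matchings

-- ===== PORT B =====
-- ways(x, y): if x == 0 or y == 0: return 1; return max(x, y) * ways(x - 1, y - 1)
-- (the second branch is a totality guard only: the tallies B passes are never negative)
def pvWays (x y : Int) : Int :=
  if x = 0 ∨ y = 0 then 1
  else if x < 0 ∨ y < 0 then 1
  else max x y * pvWays (x - 1) (y - 1)
termination_by x.toNat
decreasing_by omega

def max_matchings_alt (sequence : String) : Int :=
  -- tally = {}; for ch in sequence: tally[ch] = tally.get(ch, 0) + 1
  let tally : PySem.Dict Char Int :=
    sequence.toList.foldl (fun d ch => d.insert ch (d.getD ch 0 + 1)) PySem.Dict.empty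
  pvWays (tally.getD 'A' 0) (tally.getD 'U' 0) * pvWays (tally.getD 'G' 0) (tally.getD 'C' 0)

-- ===== PRECONDITION & SPEC =====
def Spec_max_matchings (sequence : String) (out : Int) : Prop := out = max_matchings_alt sequence
instance (sequence : String) (out : Int) : Decidable (Spec_max_matchings sequence out) := by unfold Spec_max_matchings; infer_instance

-- ===== CLAIM (what is proved, stated in full; the proofs are below) =====
def Claim_equal_max_matchings : Prop := ∀ (sequence : String), Dom_max_matchings sequence → Spec_max_matchings sequence (max_matchings sequence)

-- ===== LEMMAS AND PROOFS =====

-- Python s.count(c) for a single character c is the number of occurrences of c.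
theorem chars_count_go_single (c : Char) (l : List Char) (fuel acc : Nat) (h : l.length ≤ fuel) :
    PySem.Chars.count.go [c] fuel l acc = acc + l.count c := by
  induction l generalizing fuel acc with
  | nil => cases fuel <;> simp [PySem.Chars.count.go]
  | cons x t ih =>
    cases fuel with
    | zero => simp at h
    | succ m =>
      simp at h
      by_cases hx : x = c
      · simp [PySem.Chars.count.go, hx, List.isPrefixOf, ih _ _ h]
        omega
      · simp [PySem.Chars.count.go, List.isPrefixOf, hx, Ne.symm hx, ih _ _ h]

theorem str_count_single (s : String) (c : Char) :
    PySem.Str.count s (String.ofList [c]) = s.toList.count c := by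
  rw [PySem.Str.count_eq]
  rw [String.toList_ofList]
  unfold PySem.Chars.count
  simp only [List.isEmpty_cons, if_false, Bool.false_eq_true]
  rw [chars_count_go_single c s.toList s.toList.length 0 le_rfl]
  omega

-- max/min of a two-element Python list
theorem max2 (a b : Int) : (PySem.List.max? [a, b] id).getD 0 = max a b := by
  simp [PySem.List.max?]; split_ifs with h <;> simp <;> omega

theorem min2 (a b : Int) : (PySem.List.min? [a, b] id).getD 0 = min a b := by
  simp [PySem.List.min?]; split_ifs with h <;> simp <;> omega

-- A's nPr equals the descending factorial (for nonnegative r ≤ n given as casts).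
theorem nPr_eq (n r : Nat) (h : r ≤ n) :
    nPr (n : Int) (r : Int) = (Nat.descFactorial n r : Int) := by
  unfold nPr pvFactorial
  have h1 : ((n : Int) - (r : Int)) = ((n - r : Nat) : Int) := by
    rw [Nat.cast_sub h]
  rw [h1]
  simp only [Int.toNat_natCast]
  rw [PySem.Int.floordiv_natCast]
  rw [← Nat.descFactorial_eq_div h]

-- B's recursive pairing count equals the descending factorial of (max, min).
theorem pvWays_eq (m : Nat) : ∀ n : Nat,
    pvWays (m : Int) (n : Int) = (Nat.descFactorial (max m n) (min m n) : Int) := by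
  induction m with
  | zero =>
    intro n
    rw [pvWays]
    simp
  | succ k ih =>
    intro n
    cases n with
    | zero =>
      rw [pvWays]
      simp
    | succ j =>
      rw [pvWays]
      have hk : ((k + 1 : Nat) : Int) ≠ 0 := by push_cast; omega
      have hj : ((j + 1 : Nat) : Int) ≠ 0 := by push_cast; omega
      rw [if_neg (by push_cast; omega), if_neg (by push_cast; omega)]
      have h1 : ((k + 1 : Nat) : Int) - 1 = (k : Int) := by push_cast; ring
      have h2 : ((j + 1 : Nat) : Int) - 1 = (j : Int) := by push_cast; ring
      rw [h1, h2, ih j]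
      rw [Nat.succ_max_succ, Nat.succ_min_succ, Nat.succ_descFactorial_succ]
      have hm : max ((k + 1 : Nat) : Int) ((j + 1 : Nat) : Int) = ((max k j : Nat) : Int) + 1 := by
        push_cast [Nat.cast_max]; omega
      rw [hm]
      push_cast
      ring

-- A's nPr and B's ways agree on a pair of nonnegative counts.
theorem nPr_eq_pvWays (a b : Nat) :
    nPr (max (a : Int) (b : Int)) (min (a : Int) (b : Int)) = pvWays (a : Int) (b : Int) := by
  rw [← Nat.cast_max, ← Nat.cast_min,
    nPr_eq (max a b) (min a b) (min_le_max), pvWays_eq a b]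

-- B's dict tally returns the per-character count.
theorem tally_getD (l : List Char) (c : Char) :
    (l.foldl (fun d ch => d.insert ch (d.getD ch 0 + 1)) (PySem.Dict.empty : PySem.Dict Char Int)).getD c 0
      = (l.count c : Int) := by
  rw [PySem.Dict.getD_foldl_insert_add_one]
  simp [PySem.Dict.getD_empty]

-- ===== VERDICT (by name: the statement is the Claim_ definition above) =====
theorem max_matchings_spec : Claim_equal_max_matchings := by
  intro sequence _
  unfold Spec_max_matchings max_matchings max_matchings_alt
  rw [show ("AU".toList) = ['A','U'] from rfl, show ("GC".toList) = ['G','C'] from rfl]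
  simp only [List.foldl_cons, List.foldl_nil, List.nil_append, List.cons_append,
    str_count_single, max2, min2, tally_getD]
  rw [nPr_eq_pvWays, nPr_eq_pvWays]
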